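-- pv_equiv track=rewrite | github.com/snekfx/task-py | src/taskpy/modern/shared/tasks.py | parse_task_ids
-- ===== SOURCE A (Python) =====
-- from typing import Any, Dict, List, Optional, Tuple
--
-- def parse_task_ids(raw_ids: List[str]) -> List[str]:
--     """Normalize comma/space separated task IDs."""
--     task_ids: List[str] = []
--     for item in raw_ids:
--         if "," in item:
--             task_ids.extend([part.strip().upper() for part in item.split(",") if part.strip()])
--         else:
--             task_ids.append(item.strip().upper())
--
--     seen = set()
--     ordered: List[str] = []
--     for task_id in task_ids:
--         if task_id and task_id not in seen:
--             ordered.append(task_id)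
--             seen.add(task_id)
--     return ordered
-- ===== SOURCE B (Python) =====
-- def parse_task_ids(raw_ids):
--     """Normalize comma/space separated task IDs (single fused pass)."""
--     seen = set()
--     ordered = []
--     for item in raw_ids:
--         for part in item.split(","):
--             norm = part.strip().upper()
--             if norm and norm not in seen:
--                 seen.add(norm)
--                 ordered.append(norm)
--     return ordered
-- ===== Notes on version B (the rewrite author's own statement) =====
-- stated objective: simpler
-- what changed: Fuses A's two passes (normalize into an intermediate task_ids list, then dedup) into one nested loop over split(',') parts, dropping the comma/non-comma branch and the intermediate list.
import Mathlib
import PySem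

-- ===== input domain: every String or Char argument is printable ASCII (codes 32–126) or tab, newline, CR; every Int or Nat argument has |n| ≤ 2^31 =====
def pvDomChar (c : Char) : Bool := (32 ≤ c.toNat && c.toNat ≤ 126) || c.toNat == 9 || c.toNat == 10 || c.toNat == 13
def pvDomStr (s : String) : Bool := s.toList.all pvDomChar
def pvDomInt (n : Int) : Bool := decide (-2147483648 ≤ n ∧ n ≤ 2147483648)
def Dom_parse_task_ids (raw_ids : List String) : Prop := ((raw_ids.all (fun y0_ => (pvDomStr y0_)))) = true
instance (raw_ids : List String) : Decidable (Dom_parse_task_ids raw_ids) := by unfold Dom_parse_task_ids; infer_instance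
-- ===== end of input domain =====

-- B fuses A's two passes (normalize to an intermediate list, then dedup) into one nested
-- loop over split(',') parts; same cost, simpler structure.


-- ===== PORT A =====
def parse_task_ids (raw_ids : List String) : List String :=
  let task_ids : List String := raw_ids.foldl (fun task_ids item =>
    if PySem.Str.isIn "," item then
      task_ids ++ ((PySem.Chars.splitOn item.toList ",".toList).filter
          (fun part => !(PySem.Chars.strip part).isEmpty)).map
          (fun part => String.ofList (PySem.Chars.upper (PySem.Chars.strip part)))
    else
      task_ids ++ [PySem.Str.upper (PySem.Str.strip item)]) []
  (task_ids.foldl (fun (st : PySem.Set String × List String) task_id =>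
      if task_id ≠ "" ∧ task_id ∉ st.1 then (PySem.Set.add st.1 task_id, st.2 ++ [task_id])
      else st)
    ((PySem.Set.ofList [] : PySem.Set String), ([] : List String))).2

-- ===== PORT B =====
-- norm = part.strip().upper()
def pvNormB (part : List Char) : String :=
  String.ofList (PySem.Chars.upper (PySem.Chars.strip part))

-- the body of B's inner loop: append norm if nonempty and unseen
def pvStepB (st : PySem.Set String × List String) (part : List Char) :
    PySem.Set String × List String :=
  let norm := pvNormB part
  if norm ≠ "" ∧ norm ∉ st.1 then (PySem.Set.add st.1 norm, st.2 ++ [norm]) else st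

def parse_task_ids_alt (raw_ids : List String) : List String :=
  (raw_ids.foldl (fun st item =>
      (PySem.Chars.splitOn item.toList ",".toList).foldl pvStepB st)
    ((PySem.Set.ofList [] : PySem.Set String), ([] : List String))).2

-- ===== PRECONDITION & SPEC =====
def Spec_parse_task_ids (raw_ids : List String) (out : List String) : Prop := out = parse_task_ids_alt raw_ids
instance (raw_ids : List String) (out : List String) : Decidable (Spec_parse_task_ids raw_ids out) := by unfold Spec_parse_task_ids; infer_instance

-- ===== CLAIM (what is proved, stated in full; the proofs are below) =====
def Claim_equal_parse_task_ids : Prop := ∀ (raw_ids : List String), Dom_parse_task_ids raw_ids → Spec_parse_task_ids raw_ids (parse_task_ids raw_ids)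

-- ===== LEMMAS AND PROOFS =====

-- A's phase-1 contribution of one item
def pvAItems (item : String) : List String :=
  if PySem.Str.isIn "," item then
    ((PySem.Chars.splitOn item.toList ",".toList).filter
        (fun part => !(PySem.Chars.strip part).isEmpty)).map
        (fun part => String.ofList (PySem.Chars.upper (PySem.Chars.strip part)))
  else
    [PySem.Str.upper (PySem.Str.strip item)]

-- A's dedup step
def pvDedup (st : PySem.Set String × List String) (task_id : String) :
    PySem.Set String × List String :=
  if task_id ≠ "" ∧ task_id ∉ st.1 then (PySem.Set.add st.1 task_id, st.2 ++ [task_id]) else st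

lemma pv_go_no_sep (sep : List Char) :
    ∀ (fuel : Nat) (l cur : List Char) (acc : List (List Char)),
      (∀ j, ¬ sep <+: l.drop j) →
      PySem.Chars.splitOn.go sep fuel l cur acc = acc.reverse ++ [cur.reverse ++ l] := by
  intro fuel
  induction fuel with
  | zero =>
    intro l cur acc _
    rw [PySem.Chars.splitOn.go.eq_def]
    cases l <;> simp
  | succ fuel ih =>
    intro l cur acc h
    cases l with
    | nil => rw [PySem.Chars.splitOn.go.eq_def]; simp
    | cons c rest =>
      rw [PySem.Chars.splitOn.go.eq_def]
      have hpre : sep.isPrefixOf (c :: rest) = false := by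
        by_contra hcon
        exact h 0 (by simpa using (List.isPrefixOf_iff_prefix.mp (by simpa using hcon)))
      simp only [hpre]
      rw [ih rest (c :: cur) acc (fun j => by simpa using h (j + 1))]
      simp

lemma pv_splitOn_no_sep (sep s : List Char) (h : PySem.Chars.isIn sep s = false) :
    PySem.Chars.splitOn s sep = [s] := by
  have hj : ∀ j, ¬ sep <+: s.drop j := by
    intro j hpre
    have := (PySem.Chars.exists_prefix_drop_iff_isIn sep s).mp ⟨j, hpre⟩
    simp [h] at this
  unfold PySem.Chars.splitOn
  rw [pv_go_no_sep sep (s.length + 1) s [] [] hj]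
  simp

lemma pv_foldl_filter (parts : List (List Char)) :
    ∀ st, (parts.filter (fun part => !(PySem.Chars.strip part).isEmpty)).foldl
        (fun st part => pvDedup st (String.ofList (PySem.Chars.upper (PySem.Chars.strip part)))) st
      = parts.foldl
        (fun st part => pvDedup st (String.ofList (PySem.Chars.upper (PySem.Chars.strip part)))) st := by
  induction parts with
  | nil => intro st; rfl
  | cons p ps ih =>
    intro st
    by_cases hp : (PySem.Chars.strip p).isEmpty = true
    · have hn : String.ofList (PySem.Chars.upper (PySem.Chars.strip p)) = "" := by
        have hs : PySem.Chars.strip p = [] := by simpa [List.isEmpty_iff] using hp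
        simp [hs, PySem.Chars.upper]
      have hstep : pvDedup st (String.ofList (PySem.Chars.upper (PySem.Chars.strip p))) = st := by
        simp [pvDedup, hn]
      simp only [List.filter_cons, hp, Bool.not_true, List.foldl_cons, hstep]
      exact ih st
    · simp only [List.filter_cons, eq_false_of_ne_true hp, Bool.not_false, List.foldl_cons]
      exact ih (pvDedup st (String.ofList (PySem.Chars.upper (PySem.Chars.strip p))))

lemma pv_stepB_eq (st : PySem.Set String × List String) (part : List Char) :
    pvStepB st part = pvDedup st (pvNormB part) := rfl

lemma pv_item (item : String) (st : PySem.Set String × List String) :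
    (pvAItems item).foldl pvDedup st
      = (PySem.Chars.splitOn item.toList ",".toList).foldl pvStepB st := by
  by_cases hc : PySem.Str.isIn "," item = true
  · simp only [pvAItems, hc, if_pos, List.foldl_map]
    rw [pv_foldl_filter]
    rfl
  · have hc' : PySem.Chars.isIn ",".toList item.toList = false := by
      rw [← PySem.Str.isIn_eq]; exact eq_false_of_ne_true hc
    rw [pv_splitOn_no_sep _ _ hc']
    have hnorm : PySem.Str.upper (PySem.Str.strip item) = pvNormB item.toList := by
      simp [PySem.Str.upper, PySem.Str.strip, pvNormB]
    simp only [pvAItems, eq_false_of_ne_true hc, Bool.false_eq_true, if_false,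
      List.foldl_cons, List.foldl_nil, hnorm, pv_stepB_eq]

lemma pv_foldl_flatMap {α β σ : Type} (g : α → List β) (f : σ → β → σ) :
    ∀ (l : List α) (init : σ),
      (l.flatMap g).foldl f init = l.foldl (fun st x => (g x).foldl f st) init := by
  intro l
  induction l with
  | nil => intro init; rfl
  | cons x xs ih => intro init; simp [List.flatMap_cons, List.foldl_append, ih]

lemma pv_phase1 (raw_ids : List String) :
    ∀ (acc : List String),
      raw_ids.foldl (fun task_ids item =>
        if PySem.Str.isIn "," item then
          task_ids ++ ((PySem.Chars.splitOn item.toList ",".toList).filter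
              (fun part => !(PySem.Chars.strip part).isEmpty)).map
              (fun part => String.ofList (PySem.Chars.upper (PySem.Chars.strip part)))
        else
          task_ids ++ [PySem.Str.upper (PySem.Str.strip item)]) acc
      = acc ++ raw_ids.flatMap pvAItems := by
  induction raw_ids with
  | nil => intro acc; simp
  | cons item rest ih =>
    intro acc
    simp only [List.foldl_cons, List.flatMap_cons, ih]
    rw [← List.append_assoc]
    congr 1
    unfold pvAItems
    split <;> rfl

-- ===== VERDICT (by name: the statement is the Claim_ definition above) =====
theorem parse_task_ids_spec : Claim_equal_parse_task_ids := by
  intro raw_ids _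
  unfold Spec_parse_task_ids parse_task_ids parse_task_ids_alt
  rw [pv_phase1 raw_ids []]
  simp only [List.nil_append]
  have hD : (fun (st : PySem.Set String × List String) (task_id : String) =>
      if task_id ≠ "" ∧ task_id ∉ st.1 then (PySem.Set.add st.1 task_id, st.2 ++ [task_id])
      else st) = pvDedup := rfl
  rw [hD, pv_foldl_flatMap pvAItems pvDedup]
  have hf : (fun (st : PySem.Set String × List String) (x : String) =>
        (pvAItems x).foldl pvDedup st)
      = (fun st item => (PySem.Chars.splitOn item.toList ",".toList).foldl pvStepB st) := by
    funext st item
    exact pv_item item st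
  rw [hf]
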